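-- pv_equiv track=rewrite | github.com/Kasarlakavyasri/Pichus | arrange_pichus.py | Ucheck
-- ===== SOURCE A (Python) =====
-- def Ucheck(house_map,r,c):
--     if(0<=r<len(house_map) and (0<= c <len(house_map[0]))):
--         if house_map[r][c] in "X@":
--             return True
--         elif house_map[r][c]=="p":
--             return False
--         else:
--             return Ucheck(house_map,r-1,c)
--     return True
-- ===== SOURCE B (Python) =====
-- def Ucheck(house_map, r, c):
--     # Single bounds check, then scan the column downward-in-index for the first
--     # marker character; the answer is just "that marker is not a pichu".
--     if not (0 <= r < len(house_map) and 0 <= c < len(house_map[0])):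
--         return True
--     for i in range(r, -1, -1):
--         ch = house_map[i][c]
--         if ch in "X@p":
--             return ch != "p"
--     return True
-- ===== Notes on version B (the rewrite author's own statement) =====
-- stated objective: idiomatic
-- what changed: Replaces the recursion that re-checks both bounds on every step with a single up-front bounds check followed by a for-loop over range(r, -1, -1) that finds the first marker character in the column and returns ch != 'p'.
import Mathlib
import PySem

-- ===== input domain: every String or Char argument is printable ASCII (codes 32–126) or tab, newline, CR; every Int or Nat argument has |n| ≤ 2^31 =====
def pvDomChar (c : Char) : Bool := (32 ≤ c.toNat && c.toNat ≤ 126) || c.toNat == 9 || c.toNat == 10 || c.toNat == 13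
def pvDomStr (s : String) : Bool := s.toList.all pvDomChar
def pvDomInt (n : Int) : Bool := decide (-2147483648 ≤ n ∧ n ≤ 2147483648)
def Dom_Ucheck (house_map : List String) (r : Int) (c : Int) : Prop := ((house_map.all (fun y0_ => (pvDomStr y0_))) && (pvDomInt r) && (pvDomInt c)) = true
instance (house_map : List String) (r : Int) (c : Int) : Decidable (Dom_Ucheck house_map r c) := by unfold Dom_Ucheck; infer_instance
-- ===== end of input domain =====

-- B: the same upward column scan written idiomatically — one up-front bounds check, then a
-- for-loop over range(r,-1,-1) returning ch != 'p' at the first marker char (no speed claim).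


-- house_map[r][c] as Python computes it (none = IndexError; under Pre_ the none branch is never reached)
def pvCharAt (house_map : List String) (i : Int) (c : Int) : Option Char :=
  (PySem.List.pyGet? house_map i).bind (fun row => PySem.Str.pyGet? row c)

-- ===== PORT A =====
def Ucheck (house_map : List String) (r : Int) (c : Int) : Bool :=
  if h : 0 ≤ r ∧ r < (house_map.length : Int) ∧ 0 ≤ c ∧ c < PySem.Str.len (house_map.headD "") then
    match pvCharAt house_map r c with
    | some ch =>
        if ch = 'X' ∨ ch = '@' then true
        else if ch = 'p' then false
        else Ucheck house_map (r - 1) c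
    | none => true   -- Python raises IndexError here; excluded by Pre_Ucheck
  else true
termination_by (r + 1).toNat
decreasing_by omega

-- ===== PORT B =====
-- the for-loop of Source B over the index list range(r, -1, -1)
def pvScanCol (house_map : List String) (c : Int) : List Int → Bool
  | [] => true
  | i :: rest =>
      match pvCharAt house_map i c with
      | some ch => if ch ∈ (['X', '@', 'p'] : List Char) then decide (ch ≠ 'p') else pvScanCol house_map c rest
      | none => pvScanCol house_map c rest   -- Python raises IndexError here; excluded by Pre_Ucheck

def Ucheck_alt (house_map : List String) (r : Int) (c : Int) : Bool :=
  if 0 ≤ r ∧ r < (house_map.length : Int) ∧ 0 ≤ c ∧ c < PySem.Str.len (house_map.headD "") then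
    pvScanCol house_map c (PySem.List.pyRange r (-1) (-1))
  else true

-- ===== PRECONDITION & SPEC =====
def pvBlockerAt (house_map : List String) (i : Int) (c : Int) : Bool :=
  match pvCharAt house_map i c with
  | some ch => ch ∈ (['X', '@', 'p'] : List Char)
  | none => false

-- Pre_ excludes exactly the inputs where the Python A raises IndexError: with the initial bounds
-- check true, the upward scan reaches a row of length ≤ c with no X/@/p row strictly between it and r.
def Pre_Ucheck (house_map : List String) (r : Int) (c : Int) : Prop :=
  (0 ≤ r ∧ r < (house_map.length : Int) ∧ 0 ≤ c ∧ c < PySem.Str.len (house_map.headD "")) →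
  ∀ i : Nat, i < house_map.length → (i : Int) ≤ r →
    PySem.Str.len (house_map.getD i "") ≤ c →
    ∃ j : Nat, j < house_map.length ∧ i < j ∧ (j : Int) ≤ r ∧ pvBlockerAt house_map (j : Int) c = true

instance (house_map : List String) (r : Int) (c : Int) : Decidable (Pre_Ucheck house_map r c) := by
  unfold Pre_Ucheck; infer_instance

def pvWitness_Ucheck : List String × Int × Int := (["p.", "X."], 1, 0)

def Spec_Ucheck (house_map : List String) (r : Int) (c : Int) (out : Bool) : Prop := out = Ucheck_alt house_map r c
instance (house_map : List String) (r : Int) (c : Int) (out : Bool) : Decidable (Spec_Ucheck house_map r c out) := by unfold Spec_Ucheck; infer_instance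

-- ===== CLAIM (what is proved, stated in full; the proofs are below) =====
def Claim_equal_Ucheck : Prop := ∀ (house_map : List String) (r : Int) (c : Int), Dom_Ucheck house_map r c → Pre_Ucheck house_map r c → Spec_Ucheck house_map r c (Ucheck house_map r c)

-- ===== LEMMAS AND PROOFS =====

lemma pv_key (house_map : List String) (c : Int)
    (hc0 : 0 ≤ c) (hc1 : c < PySem.Str.len (house_map.headD "")) :
    ∀ n : Nat, ∀ r : Int, r = (n : Int) → r < (house_map.length : Int) →
    (∀ i : Nat, i < house_map.length → (i : Int) ≤ r →
      PySem.Str.len (house_map.getD i "") ≤ c →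
      ∃ j : Nat, j < house_map.length ∧ i < j ∧ (j : Int) ≤ r ∧ pvBlockerAt house_map (j : Int) c = true) →
    Ucheck house_map r c = pvScanCol house_map c (PySem.List.pyRange r (-1) (-1)) := by
  intro n
  induction n using Nat.strong_induction_on with
  | _ n ih =>
    intro r hrn hrlen hP
    subst hrn
    have hrnat : n < house_map.length := by omega
    -- the character at (r, c) exists under hP
    have hrowlen : c < PySem.Str.len (house_map.getD n "") := by
      by_contra hle
      push_neg at hle
      obtain ⟨j, _, hj2, hj3, _⟩ := hP n hrnat (by omega) hle
      omega
    have hgetD : house_map.getD n "" = house_map[n] := List.getD_eq_getElem _ _ hrnat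
    have hlen : c.toNat < (house_map[n]).toList.length := by
      rw [hgetD] at hrowlen
      simp only [PySem.Str.len_eq] at hrowlen
      omega
    have hchar : pvCharAt house_map (n : Int) c = some ((house_map[n]).toList[c.toNat]) := by
      unfold pvCharAt
      rw [PySem.List.pyGet?_natCast, List.getElem?_eq_getElem hrnat]
      simp only [Option.bind_some, PySem.Str.pyGet?_eq, PySem.Chars.pyGet?_eq_listPyGet?]
      rw [PySem.List.pyGet?_of_nonneg house_map[n].toList hc0, List.getElem?_eq_getElem hlen]
    set ch := (house_map[n]).toList[c.toNat] with hch
    have hr0 : (0 : Int) ≤ (n : Int) := by omega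
    rw [Ucheck, dif_pos ⟨hr0, hrlen, hc0, hc1⟩, hchar]
    rw [PySem.List.pyRange_neg_one_cons (by omega : (-1 : Int) < (n : Int))]
    simp only [pvScanCol, hchar]
    by_cases hX : ch = 'X' ∨ ch = '@'
    · have hmem : ch ∈ (['X', '@', 'p'] : List Char) := by rcases hX with h | h <;> simp [h]
      have hnp : ch ≠ 'p' := by rcases hX with h | h <;> simp [h]
      simp [hmem, hnp, hX]
    · by_cases hp : ch = 'p'
      · simp [hp]
      · have hnmem : ch ∉ (['X', '@', 'p'] : List Char) := by
          simp only [List.mem_cons, List.not_mem_nil, or_false]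
          push_neg
          exact ⟨fun h => hX (Or.inl h), fun h => hX (Or.inr h), hp⟩
        simp only [hX, if_false, hp, hnmem]
        -- recursive step
        by_cases hr1 : n = 0
        · subst hr1
          rw [Ucheck, dif_neg (by omega)]
          rw [show ((0 : Nat) : Int) - 1 = -1 by omega,
              PySem.List.pyRange_neg_one_eq_nil (le_refl (-1 : Int))]
          rfl
        · have hblock : ∀ j : Nat, (j : Int) = (n : Int) → pvBlockerAt house_map (j : Int) c = true → False := by
            intro j hj hbl
            unfold pvBlockerAt at hbl
            rw [hj, hchar] at hbl
            exact hnmem (by simpa using hbl)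
          refine ih (n - 1) (by omega) ((n : Int) - 1) (by omega) (by omega) ?_
          intro i hi1 hi2 hi3
          obtain ⟨j, hj1, hj2, hj3, hj4⟩ := hP i hi1 (by omega) hi3
          refine ⟨j, hj1, hj2, ?_, hj4⟩
          by_contra hjr
          have : (j : Int) = (n : Int) := by omega
          exact hblock j this hj4

-- ===== VERDICT (by name: the statement is the Claim_ definition above) =====
theorem Ucheck_spec : Claim_equal_Ucheck := by
  intro house_map r c _ hpre
  unfold Spec_Ucheck Ucheck_alt
  by_cases h : 0 ≤ r ∧ r < (house_map.length : Int) ∧ 0 ≤ c ∧ c < PySem.Str.len (house_map.headD "")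
  · rw [if_pos h]
    exact pv_key house_map c h.2.2.1 h.2.2.2 r.toNat r (by omega) h.2.1 (hpre h)
  · rw [if_neg h, Ucheck, dif_neg h]
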